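-- pv_equiv track=rewrite | github.com/DEOWL-kan/ai-image-trust-scanner | scripts/day15_false_positive_resolution_analysis.py | flip_type_for
-- ===== SOURCE A (Python) =====
-- def flip_type_for(original_label: str, resized_labels: list[str]) -> str:
--     transitions = [(original_label, label) for label in resized_labels if label and label != original_label]
--     priority = [
--         ("real", "ai", "real_to_ai_after_resize"),
--         ("ai", "real", "ai_to_real_after_resize"),
--         ("ai", "uncertain", "ai_to_uncertain_after_resize"),
--         ("real", "uncertain", "real_to_uncertain_after_resize"),
--         ("uncertain", "ai", "uncertain_to_ai_after_resize"),
--         ("uncertain", "real", "uncertain_to_real_after_resize"),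
--     ]
--     for source, target, name in priority:
--         if (source, target) in transitions:
--             return name
--     return "other" if transitions else "none"
-- ===== SOURCE B (Python) =====
-- def flip_type_for(original_label: str, resized_labels: list[str]) -> str:
--     table = {
--         ("real", "ai"): (0, "real_to_ai_after_resize"),
--         ("ai", "real"): (1, "ai_to_real_after_resize"),
--         ("ai", "uncertain"): (2, "ai_to_uncertain_after_resize"),
--         ("real", "uncertain"): (3, "real_to_uncertain_after_resize"),
--         ("uncertain", "ai"): (4, "uncertain_to_ai_after_resize"),
--         ("uncertain", "real"): (5, "uncertain_to_real_after_resize"),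
--     }
--     best = None
--     any_transition = False
--     for label in resized_labels:
--         if not label or label == original_label:
--             continue
--         any_transition = True
--         hit = table.get((original_label, label))
--         if hit is not None and (best is None or hit[0] < best[0]):
--             best = hit
--     if best is not None:
--         return best[1]
--     return "other" if any_transition else "none"
-- ===== Notes on version B (the rewrite author's own statement) =====
-- stated objective: alternative
-- what changed: Instead of materializing the transitions list and scanning the six priority entries with a membership test each, B makes a single pass over resized_labels, keeping the lowest-rank hit from a (source,target)->rank,name table plus an any-transition flag.
import Mathlib
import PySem

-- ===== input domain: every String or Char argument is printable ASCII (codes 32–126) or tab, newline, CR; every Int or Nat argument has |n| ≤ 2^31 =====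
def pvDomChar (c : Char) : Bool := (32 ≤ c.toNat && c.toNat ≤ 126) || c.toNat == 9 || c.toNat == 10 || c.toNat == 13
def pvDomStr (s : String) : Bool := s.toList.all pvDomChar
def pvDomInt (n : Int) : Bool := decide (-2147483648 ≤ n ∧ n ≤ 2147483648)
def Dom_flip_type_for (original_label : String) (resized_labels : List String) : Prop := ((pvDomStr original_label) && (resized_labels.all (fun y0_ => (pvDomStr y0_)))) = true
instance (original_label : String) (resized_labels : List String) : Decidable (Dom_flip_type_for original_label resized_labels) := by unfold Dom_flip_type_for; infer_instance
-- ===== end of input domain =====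

-- B replaces A's materialized transitions list + six-entry priority scan with membership
-- tests by a single pass over resized_labels keeping the lowest-rank hit from a
-- (source,target) → (rank,name) table (objective: alternative decomposition).

-- ===== PORT A =====

def pvValid (original_label label : String) : Bool := !(label == "") && !(label == original_label)

def pvPriority : List (String × String × String) :=
  [("real", "ai", "real_to_ai_after_resize"),
   ("ai", "real", "ai_to_real_after_resize"),
   ("ai", "uncertain", "ai_to_uncertain_after_resize"),
   ("real", "uncertain", "real_to_uncertain_after_resize"),
   ("uncertain", "ai", "uncertain_to_ai_after_resize"),
   ("uncertain", "real", "uncertain_to_real_after_resize")]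

-- A's for-loop over priority with its early return, as an Option-returning scan
def pvScan (transitions : List (String × String)) : List (String × String × String) → Option String
  | [] => none
  | (s, t, n) :: rest => if (s, t) ∈ transitions then some n else pvScan transitions rest

def flip_type_for (original_label : String) (resized_labels : List String) : String :=
  let transitions := (resized_labels.filter (pvValid original_label)).map (fun label => (original_label, label))
  match pvScan transitions pvPriority with
  | some n => n
  | none => if transitions ≠ [] then "other" else "none"

-- ===== PORT B =====

-- Source B's dict literal, as key lookup (dict.get)
def pvTableGet (key : String × String) : Option (Nat × String) :=
  if key = ("real", "ai") then some (0, "real_to_ai_after_resize")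
  else if key = ("ai", "real") then some (1, "ai_to_real_after_resize")
  else if key = ("ai", "uncertain") then some (2, "ai_to_uncertain_after_resize")
  else if key = ("real", "uncertain") then some (3, "real_to_uncertain_after_resize")
  else if key = ("uncertain", "ai") then some (4, "uncertain_to_ai_after_resize")
  else if key = ("uncertain", "real") then some (5, "uncertain_to_real_after_resize")
  else none

-- one iteration of Source B's loop: state = (best, any_transition)
def pvStep (original_label : String) (st : Option (Nat × String) × Bool) (label : String) :
    Option (Nat × String) × Bool :=
  if label = "" ∨ label = original_label then st
  else
    match pvTableGet (original_label, label), st.1 with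
    | some h, none => (some h, true)
    | some h, some b => (if h.1 < b.1 then some h else some b, true)
    | none, b => (b, true)

def flip_type_for_alt (original_label : String) (resized_labels : List String) : String :=
  let st := resized_labels.foldl (pvStep original_label) (none, false)
  match st.1 with
  | some b => b.2
  | none => if st.2 then "other" else "none"

-- ===== PRECONDITION & SPEC =====
def Spec_flip_type_for (original_label : String) (resized_labels : List String) (out : String) : Prop := out = flip_type_for_alt original_label resized_labels
instance (original_label : String) (resized_labels : List String) (out : String) : Decidable (Spec_flip_type_for original_label resized_labels out) := by unfold Spec_flip_type_for; infer_instance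

-- ===== CLAIM (what is proved, stated in full; the proofs are below) =====
def Claim_equal_flip_type_for : Prop := ∀ (original_label : String) (resized_labels : List String), Dom_flip_type_for original_label resized_labels → Spec_flip_type_for original_label resized_labels (flip_type_for original_label resized_labels)

-- ===== LEMMAS AND PROOFS =====

-- merge a candidate hit into the current best (left-biased on ties)
def pvMerge : Option (Nat × String) → Option (Nat × String) → Option (Nat × String)
  | b, none => b
  | none, some h => some h
  | some b, some h => if h.1 < b.1 then some h else some b

-- the hit contributed by one label of the list
def pvH (original_label label : String) : Option (Nat × String) :=
  if label = "" ∨ label = original_label then none else pvTableGet (original_label, label)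

def pvBest (original_label : String) : List String → Option (Nat × String)
  | [] => none
  | x :: xs => pvMerge (pvH original_label x) (pvBest original_label xs)

theorem pvMerge_none (b : Option (Nat × String)) : pvMerge b none = b := by cases b <;> rfl

theorem pvMerge_none_left (b : Option (Nat × String)) : pvMerge none b = b := by cases b <;> rfl

theorem pvMerge_assoc (a b c : Option (Nat × String)) :
    pvMerge (pvMerge a b) c = pvMerge a (pvMerge b c) := by
  cases a <;> cases b <;> cases c <;>
    simp only [pvMerge] <;> split_ifs <;> simp only [pvMerge] <;> split_ifs <;>
    first | rfl | omega

theorem pvStep_eq (o : String) (st : Option (Nat × String) × Bool) (x : String) :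
    pvStep o st x = (pvMerge st.1 (pvH o x), st.2 || pvValid o x) := by
  by_cases hc : x = "" ∨ x = o
  · simp [pvStep, pvH, hc, pvMerge_none, pvValid]
    rcases hc with h | h <;> simp [h]
  · have hv : pvValid o x = true := by
      simp [pvValid]
      constructor
      · intro h; exact hc (Or.inl h)
      · intro h; exact hc (Or.inr h)
    cases h : pvTableGet (o, x) <;> cases hb : st.1 <;>
      simp [pvStep, pvH, hc, hv, h, hb, pvMerge]

theorem pvFold (o : String) (xs : List String) :
    ∀ (b : Option (Nat × String)) (f : Bool),
      xs.foldl (pvStep o) (b, f) = (pvMerge b (pvBest o xs), f || xs.any (pvValid o)) := by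
  induction xs with
  | nil => intro b f; simp [pvBest, pvMerge_none]
  | cons x xs ih =>
      intro b f
      simp only [List.foldl_cons, pvStep_eq, ih, pvBest, List.any_cons]
      rw [pvMerge_assoc, Bool.or_assoc]

theorem pvAlt_char (o : String) (xs : List String) :
    flip_type_for_alt o xs =
      match pvBest o xs with
      | some b => b.2
      | none => if xs.any (pvValid o) then "other" else "none" := by
  simp [flip_type_for_alt, pvFold, pvMerge_none_left]

theorem bestReal (xs : List String) :
    pvBest "real" xs =
      if "ai" ∈ xs then some (0, "real_to_ai_after_resize")
      else if "uncertain" ∈ xs then some (3, "real_to_uncertain_after_resize")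
      else none := by
  induction xs with
  | nil => simp [pvBest]
  | cons x xs ih =>
      by_cases ha : x = "ai"
      · subst ha
        rw [pvBest, ih]
        split_ifs <;> simp_all [pvH, pvTableGet, pvMerge, List.mem_cons]
      · by_cases hu : x = "uncertain"
        · subst hu
          rw [pvBest, ih]
          split_ifs <;> simp_all [pvH, pvTableGet, pvMerge, List.mem_cons]
        · have hx : pvH "real" x = none := by
            simp only [pvH, pvTableGet, Prod.mk.injEq]
            split_ifs <;> simp_all
          rw [pvBest, ih, hx]
          simp [pvMerge_none_left, List.mem_cons, Ne.symm ha, Ne.symm hu]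

theorem bestAi (xs : List String) :
    pvBest "ai" xs =
      if "real" ∈ xs then some (1, "ai_to_real_after_resize")
      else if "uncertain" ∈ xs then some (2, "ai_to_uncertain_after_resize")
      else none := by
  induction xs with
  | nil => simp [pvBest]
  | cons x xs ih =>
      by_cases ha : x = "real"
      · subst ha
        rw [pvBest, ih]
        split_ifs <;> simp_all [pvH, pvTableGet, pvMerge, List.mem_cons]
      · by_cases hu : x = "uncertain"
        · subst hu
          rw [pvBest, ih]
          split_ifs <;> simp_all [pvH, pvTableGet, pvMerge, List.mem_cons]
        · have hx : pvH "ai" x = none := by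
            simp only [pvH, pvTableGet, Prod.mk.injEq]
            split_ifs <;> simp_all
          rw [pvBest, ih, hx]
          simp [pvMerge_none_left, List.mem_cons, Ne.symm ha, Ne.symm hu]

theorem bestUnc (xs : List String) :
    pvBest "uncertain" xs =
      if "ai" ∈ xs then some (4, "uncertain_to_ai_after_resize")
      else if "real" ∈ xs then some (5, "uncertain_to_real_after_resize")
      else none := by
  induction xs with
  | nil => simp [pvBest]
  | cons x xs ih =>
      by_cases ha : x = "ai"
      · subst ha
        rw [pvBest, ih]
        split_ifs <;> simp_all [pvH, pvTableGet, pvMerge, List.mem_cons]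
      · by_cases hu : x = "real"
        · subst hu
          rw [pvBest, ih]
          split_ifs <;> simp_all [pvH, pvTableGet, pvMerge, List.mem_cons]
        · have hx : pvH "uncertain" x = none := by
            simp only [pvH, pvTableGet, Prod.mk.injEq]
            split_ifs <;> simp_all
          rw [pvBest, ih, hx]
          simp [pvMerge_none_left, List.mem_cons, Ne.symm ha, Ne.symm hu]

theorem bestOther (o : String) (h1 : o ≠ "real") (h2 : o ≠ "ai") (h3 : o ≠ "uncertain") :
    ∀ xs : List String, pvBest o xs = none := by
  intro xs
  induction xs with
  | nil => rfl
  | cons x xs ih =>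
      have hx : pvH o x = none := by
        simp only [pvH, pvTableGet, Prod.mk.injEq]
        split_ifs <;> simp_all
      rw [pvBest, hx, ih]
      rfl

theorem memT (o s t : String) (xs : List String) :
    ((s, t) ∈ (xs.filter (pvValid o)).map (fun l => (o, l))) ↔
      (s = o ∧ t ∈ xs ∧ pvValid o t = true) := by
  simp only [List.mem_map, List.mem_filter, Prod.mk.injEq]
  constructor
  · rintro ⟨l, ⟨hl, hv⟩, ho, ht⟩; subst ht; exact ⟨ho.symm, hl, hv⟩
  · rintro ⟨ho, ht, hv⟩; exact ⟨t, ⟨ht, hv⟩, ho.symm, rfl⟩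

-- ===== VERDICT (by name: the statement is the Claim_ definition above) =====
theorem flip_type_for_spec : Claim_equal_flip_type_for := by
  intro o xs _
  unfold Spec_flip_type_for
  rw [pvAlt_char]
  by_cases h1 : o = "real"
  · subst h1
    rw [bestReal]
    simp only [flip_type_for, pvScan, pvPriority, memT]
    by_cases ha : "ai" ∈ xs <;> by_cases hu : "uncertain" ∈ xs <;>
      simp [ha, hu, pvValid, List.map_eq_nil_iff]
  · by_cases h2 : o = "ai"
    · subst h2
      rw [bestAi]
      simp only [flip_type_for, pvScan, pvPriority, memT]
      by_cases hr : "real" ∈ xs <;> by_cases hu : "uncertain" ∈ xs <;>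
        simp [hr, hu, pvValid, List.map_eq_nil_iff]
    · by_cases h3 : o = "uncertain"
      · subst h3
        rw [bestUnc]
        simp only [flip_type_for, pvScan, pvPriority, memT]
        by_cases ha : "ai" ∈ xs <;> by_cases hr : "real" ∈ xs <;>
          simp [ha, hr, pvValid, List.map_eq_nil_iff]
      · rw [bestOther o h1 h2 h3]
        have n1 : ¬(("real" : String) = o) := fun h => h1 h.symm
        have n2 : ¬(("ai" : String) = o) := fun h => h2 h.symm
        have n3 : ¬(("uncertain" : String) = o) := fun h => h3 h.symm
        simp only [flip_type_for, pvScan, pvPriority, memT]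
        simp [n1, n2, n3, List.map_eq_nil_iff]
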